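-- pv_equiv track=rewrite | github.com/nazar9318/Simulacion-1c2020-TP2 | Ej 1/ej_1.py | tpos_atencion_y_espera
-- ===== SOURCE A (Python) =====
-- def tpos_atencion_y_espera(t_arribo, t_procesamiento):
--     t_atencion = []
--     t_espera = []
--
--     t_espera.append(0)
--
--     sin_espera = 0
--
--     t_atencion.append(t_arribo[0])
--     t_atencion.append(t_arribo[1]) #a la primera solicitud se la atiende en el instante que llega
--
--     for i in range (1, len(t_arribo)-1):
--         a = t_atencion[i] + t_procesamiento[i-1]
--         if a > t_arribo[i+1]:
--             t_atencion.append(a)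
--             t_espera.append(t_atencion[-1] - t_arribo[i+1])
--         else:
--             t_atencion.append(t_arribo[i+1])
--             t_espera.append(0)
--             sin_espera = sin_espera+1
--
--     return t_atencion, t_espera, sin_espera
-- ===== SOURCE B (Python) =====
-- def tpos_atencion_y_espera(t_arribo, t_procesamiento):
--     # Closed-form via prefix sums: the k-th attention time equals
--     # P[k-1] + max_{1<=j<=k} (t_arribo[j] - P[j-1]), where P[t] is the sum of the
--     # first t processing times.  So instead of the max-recurrence on the previous
--     # attention value, keep two scalars: the running prefix sum P and the running
--     # maximum 'best' of (arrival - prefix sum).  Waits fall out as att - arrival.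
--     n = len(t_arribo)
--     t_atencion = [t_arribo[0], t_arribo[1]]
--     t_espera = [0]
--     sin_espera = 0
--     P = 0
--     best = t_arribo[1]
--     for k in range(2, n):
--         P += t_procesamiento[k - 2]
--         cand = t_arribo[k] - P
--         if cand > best:
--             best = cand
--         att = P + best
--         t_atencion.append(att)
--         w = att - t_arribo[k]
--         t_espera.append(w)
--         if w == 0:
--             sin_espera += 1
--     return t_atencion, t_espera, sin_espera
-- ===== Notes on version B (the rewrite author's own statement) =====
-- stated objective: alternative
-- what changed: A computes each attention time by the recurrence max(previous attention + processing, next arrival), reading back the list it is building; B uses the max-plus closed form att[k] = P[k-1] + max_{j<=k}(arrival[j] - P[j-1]), maintaining only a scalar prefix sum and a running maximum of arrival-minus-prefix offsets, and derives each wait as att - arrival.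
import Mathlib
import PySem

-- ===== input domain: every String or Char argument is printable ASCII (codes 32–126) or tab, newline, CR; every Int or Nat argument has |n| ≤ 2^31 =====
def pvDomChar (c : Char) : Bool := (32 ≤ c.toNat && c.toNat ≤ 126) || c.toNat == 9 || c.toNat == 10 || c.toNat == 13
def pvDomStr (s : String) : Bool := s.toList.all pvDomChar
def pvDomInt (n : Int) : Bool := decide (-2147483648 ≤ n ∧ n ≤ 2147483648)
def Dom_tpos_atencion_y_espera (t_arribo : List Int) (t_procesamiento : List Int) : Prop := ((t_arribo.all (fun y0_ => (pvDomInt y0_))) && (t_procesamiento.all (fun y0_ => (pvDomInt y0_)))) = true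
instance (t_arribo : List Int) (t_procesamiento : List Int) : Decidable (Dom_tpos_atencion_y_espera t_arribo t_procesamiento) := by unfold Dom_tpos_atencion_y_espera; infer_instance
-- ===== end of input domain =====

-- B replaces A's max-recurrence on the previous attention value by a prefix-sum /
-- running-maximum closed form, keeping only two scalars of state (objective: alternative).

-- ===== PORT A =====
-- A's loop body (one iteration of 'for i in range(1, len(t_arribo)-1)'), state = (t_atencion, t_espera, sin_espera)
def stepA (t_arribo : List Int) (t_procesamiento : List Int)
    (st : List Int × List Int × Int) (i : Int) : List Int × List Int × Int :=
  let a := PySem.List.pyGetD st.1 i 0 + PySem.List.pyGetD t_procesamiento (i - 1) 0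
  if a > PySem.List.pyGetD t_arribo (i + 1) 0 then
    (st.1 ++ [a],
     st.2.1 ++ [PySem.List.pyGetD (st.1 ++ [a]) (-1) 0 - PySem.List.pyGetD t_arribo (i + 1) 0],
     st.2.2)
  else
    (st.1 ++ [PySem.List.pyGetD t_arribo (i + 1) 0], st.2.1 ++ [(0 : Int)], st.2.2 + 1)

def tpos_atencion_y_espera (t_arribo : List Int) (t_procesamiento : List Int) : List Int × List Int × Int :=
  let t_espera : List Int := [0]
  let sin_espera : Int := 0
  let t_atencion : List Int := [PySem.List.pyGetD t_arribo 0 0, PySem.List.pyGetD t_arribo 1 0]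
  (PySem.List.pyRange 1 ((t_arribo.length : Int) - 1) 1).foldl (stepA t_arribo t_procesamiento)
    (t_atencion, t_espera, sin_espera)

-- ===== PORT B =====
-- B's loop body (one iteration of 'for k in range(2, n)'),
-- state = (t_atencion, t_espera, sin_espera, P, best)
def stepB (t_arribo : List Int) (t_procesamiento : List Int)
    (st : List Int × List Int × Int × Int × Int) (k : Int) :
    List Int × List Int × Int × Int × Int :=
  let P := st.2.2.2.1 + PySem.List.pyGetD t_procesamiento (k - 2) 0
  let cand := PySem.List.pyGetD t_arribo k 0 - P
  let best := if cand > st.2.2.2.2 then cand else st.2.2.2.2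
  let att := P + best
  let w := att - PySem.List.pyGetD t_arribo k 0
  (st.1 ++ [att], st.2.1 ++ [w],
   (if w == 0 then st.2.2.1 + 1 else st.2.2.1), P, best)

def tpos_atencion_y_espera_alt (t_arribo : List Int) (t_procesamiento : List Int) : List Int × List Int × Int :=
  let n : Int := t_arribo.length
  let s := (PySem.List.pyRange 2 n 1).foldl (stepB t_arribo t_procesamiento)
    ([PySem.List.pyGetD t_arribo 0 0, PySem.List.pyGetD t_arribo 1 0], [0], 0, 0,
     PySem.List.pyGetD t_arribo 1 0)
  (s.1, s.2.1, s.2.2.1)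

-- ===== PRECONDITION & SPEC =====
-- Pre_ excludes exactly the inputs where the Python A raises IndexError: fewer than two
-- arrivals, or a processing list shorter than len(t_arribo) - 2.
def Pre_tpos_atencion_y_espera (t_arribo : List Int) (t_procesamiento : List Int) : Prop :=
  2 ≤ t_arribo.length ∧ t_arribo.length ≤ t_procesamiento.length + 2
instance (t_arribo : List Int) (t_procesamiento : List Int) : Decidable (Pre_tpos_atencion_y_espera t_arribo t_procesamiento) := by unfold Pre_tpos_atencion_y_espera; infer_instance

def pvWitness_tpos_atencion_y_espera : List Int × List Int := ([0, 2, 3], [5])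

def Spec_tpos_atencion_y_espera (t_arribo : List Int) (t_procesamiento : List Int) (out : List Int × List Int × Int) : Prop := out = tpos_atencion_y_espera_alt t_arribo t_procesamiento
instance (t_arribo : List Int) (t_procesamiento : List Int) (out : List Int × List Int × Int) : Decidable (Spec_tpos_atencion_y_espera t_arribo t_procesamiento out) := by unfold Spec_tpos_atencion_y_espera; infer_instance

-- ===== CLAIM (what is proved, stated in full; the proofs are below) =====
def Claim_equal_tpos_atencion_y_espera : Prop := ∀ (t_arribo : List Int) (t_procesamiento : List Int), Dom_tpos_atencion_y_espera t_arribo t_procesamiento → Pre_tpos_atencion_y_espera t_arribo t_procesamiento → Spec_tpos_atencion_y_espera t_arribo t_procesamiento (tpos_atencion_y_espera t_arribo t_procesamiento)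

-- ===== LEMMAS AND PROOFS =====

-- the two folds after t iterations
def foldA (ta tp : List Int) (t : Nat) : List Int × List Int × Int :=
  (PySem.List.pyRange 1 (1 + (t : Int)) 1).foldl (stepA ta tp)
    ([PySem.List.pyGetD ta 0 0, PySem.List.pyGetD ta 1 0], [0], 0)

def foldB (ta tp : List Int) (t : Nat) : List Int × List Int × Int × Int × Int :=
  (PySem.List.pyRange 2 (2 + (t : Int)) 1).foldl (stepB ta tp)
    ([PySem.List.pyGetD ta 0 0, PySem.List.pyGetD ta 1 0], [0], 0, 0,
     PySem.List.pyGetD ta 1 0)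

lemma pyGetD_append_len (l : List Int) (x : Int) :
    PySem.List.pyGetD (l ++ [x]) ((l.length : Int)) 0 = x := by
  rw [PySem.List.pyGetD_natCast]
  simp [List.getD]

-- loop invariant: A's state is B's first three components, B's attention list has
-- length t+2, and its last element equals P + best
lemma inv (ta tp : List Int) (t : Nat) :
    foldA ta tp t = ((foldB ta tp t).1, (foldB ta tp t).2.1, (foldB ta tp t).2.2.1) ∧
    (foldB ta tp t).1.length = t + 2 ∧
    PySem.List.pyGetD (foldB ta tp t).1 (1 + (t : Int)) 0 =
      (foldB ta tp t).2.2.2.1 + (foldB ta tp t).2.2.2.2 := by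
  induction t with
  | zero =>
      refine ⟨?_, ?_, ?_⟩ <;>
        simp [foldA, foldB, PySem.List.pyRange_one_eq_nil (le_refl 1),
          PySem.List.pyRange_one_eq_nil (le_refl 2), PySem.List.pyGetD]
  | succ t ih =>
      obtain ⟨hAB, hlen, hlast⟩ := ih
      have hA : foldA ta tp (t + 1) = stepA ta tp (foldA ta tp t) (1 + (t : Int)) := by
        unfold foldA
        have hc : (1 + ((t + 1 : Nat) : Int)) = (1 + (t : Int)) + 1 := by push_cast; ring
        rw [hc, PySem.List.pyRange_one_succ_right (by omega : (1:Int) ≤ 1 + (t : Int)),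
          List.foldl_append]
        rfl
      have hB : foldB ta tp (t + 1) = stepB ta tp (foldB ta tp t) (2 + (t : Int)) := by
        unfold foldB
        have hc : (2 + ((t + 1 : Nat) : Int)) = (2 + (t : Int)) + 1 := by push_cast; ring
        rw [hc, PySem.List.pyRange_one_succ_right (by omega : (2:Int) ≤ 2 + (t : Int)),
          List.foldl_append]
        rfl
      set sB := foldB ta tp t with hsB
      set P := sB.2.2.2.1 with hP
      set best := sB.2.2.2.2 with hbest
      set p := PySem.List.pyGetD tp ((t : Int)) 0 with hp
      set r := PySem.List.pyGetD ta ((t : Int) + 2) 0 with hr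
      have hidxp : ((2 : Int) + (t : Int)) - 2 = (t : Int) := by ring
      have hidxr : ((2 : Int) + (t : Int)) = (t : Int) + 2 := by ring
      have hstepB : stepB ta tp sB (2 + (t : Int)) =
          (sB.1 ++ [(P + p) + (if r - (P + p) > best then r - (P + p) else best)],
           sB.2.1 ++ [((P + p) + (if r - (P + p) > best then r - (P + p) else best)) - r],
           (if (((P + p) + (if r - (P + p) > best then r - (P + p) else best)) - r) == 0
              then sB.2.2.1 + 1 else sB.2.2.1), P + p,
           (if r - (P + p) > best then r - (P + p) else best)) := by
        unfold stepB
        rw [hidxp, hidxr]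
      -- A's step at i = 1 + t
      have hi1 : ((1 : Int) + (t : Int)) - 1 = (t : Int) := by ring
      have hi2 : ((1 : Int) + (t : Int)) + 1 = (t : Int) + 2 := by ring
      have hget : PySem.List.pyGetD (foldA ta tp t).1 (1 + (t : Int)) 0 = P + best := by
        rw [hAB]; exact hlast
      have hstepA : stepA ta tp (foldA ta tp t) (1 + (t : Int)) =
          (if (P + best) + p > r then
            ((foldA ta tp t).1 ++ [(P + best) + p],
             (foldA ta tp t).2.1 ++
               [PySem.List.pyGetD ((foldA ta tp t).1 ++ [(P + best) + p]) (-1) 0 - r],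
             (foldA ta tp t).2.2)
          else
            ((foldA ta tp t).1 ++ [r], (foldA ta tp t).2.1 ++ [(0 : Int)],
             (foldA ta tp t).2.2 + 1)) := by
        unfold stepA
        rw [hget, hi1, hi2]
      have hAfst : (foldA ta tp t).1 = sB.1 := by rw [hAB]
      have hA2 : (foldA ta tp t).2.1 = sB.2.1 := by rw [hAB]
      have hA3 : (foldA ta tp t).2.2 = sB.2.2.1 := by rw [hAB]
      -- the appended attention value coincides
      have hattval : (P + p) + (if r - (P + p) > best then r - (P + p) else best)
          = max ((P + best) + p) r := by
        split_ifs with h <;> omega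
      constructor
      · rw [hA, hB, hstepA, hstepB]
        by_cases hcmp : (P + best) + p > r
        · rw [if_pos hcmp]
          have hmax : max ((P + best) + p) r = (P + best) + p := by omega
          have hneg : PySem.List.pyGetD ((foldA ta tp t).1 ++ [(P + best) + p]) (-1) 0
              = (P + best) + p := PySem.List.pyGetD_neg_one_append_singleton _ _ _
          have hw0 : ((((P + best) + p) - r) == 0) = false := by
            simpa using (by omega : (P + best) + p - r ≠ 0)
          rw [hAfst] at hneg
          simp [hattval, hmax, hneg, hw0, hAfst, hA2, hA3]
        · rw [if_neg hcmp]
          have hmax : max ((P + best) + p) r = r := by omega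
          simp [hattval, hmax, hAfst, hA2, hA3]
      · constructor
        · rw [hB, hstepB]
          simp [hlen]
        · rw [hB, hstepB]
          have hclen : (1 + ((t + 1 : Nat) : Int)) = (sB.1.length : Int) := by
            rw [hlen]; push_cast; ring
          simp only [hclen, pyGetD_append_len]

lemma ports_agree (ta tp : List Int) :
    tpos_atencion_y_espera ta tp = tpos_atencion_y_espera_alt ta tp := by
  unfold tpos_atencion_y_espera tpos_atencion_y_espera_alt
  dsimp only
  rcases le_or_gt ((ta.length : Int)) 2 with hle | hgt
  · rw [PySem.List.pyRange_one_eq_nil (by omega : (ta.length : Int) - 1 ≤ 1),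
      PySem.List.pyRange_one_eq_nil hle]
    rfl
  · set K : Nat := ((ta.length : Int) - 2).toNat with hKdef
    have h1 : (ta.length : Int) - 1 = 1 + (K : Int) := by rw [hKdef]; omega
    have h2 : (ta.length : Int) = 2 + (K : Int) := by rw [hKdef]; omega
    have := (inv ta tp K).1
    unfold foldA foldB at this
    rw [h1, h2]
    exact this

-- ===== VERDICT (by name: the statement is the Claim_ definition above) =====
theorem tpos_atencion_y_espera_spec : Claim_equal_tpos_atencion_y_espera := by
  intro ta tp _ _
  unfold Spec_tpos_atencion_y_espera
  exact ports_agree ta tp
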